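-- pv_equiv track=rewrite | github.com/delaschwein/albert-wrapper | utils.py | sanitize_daide
-- ===== SOURCE A (Python) =====
-- from typing import List
--
-- def sanitize_daide(daide: str, result:List[str]) -> List[str]:
--     """
--         Function to sanitize messy daide format e.g., no spaces between items
--         Assumes string only contains 3-letter daide tokens, spaces, and parens
--     """
--     if len(daide) > 0:
--         first = daide[0]
--         item, rest = None, None
--
--         if first == " ":
--             return sanitize_daide(daide[1:], result)
--         elif first.isalpha() and first.isupper():
--             item, rest = daide[:3], daide[3:]
--         else:
--             # assume is braces
--             item, rest = daide[:1], daide[1:]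
--         appended = result.copy()
--         appended.append(item)
--         return sanitize_daide(rest, appended)
--     else:
--         return result
-- ===== SOURCE B (Python) =====
-- def sanitize_daide(daide, result):
--     out = result.copy()
--     i = 0
--     n = len(daide)
--     while i < n:
--         c = daide[i]
--         if c == " ":
--             i += 1
--         elif c.isalpha() and c.isupper():
--             out.append(daide[i:i+3])
--             i += 3
--         else:
--             out.append(daide[i:i+1])
--             i += 1
--     return out
-- ===== Notes on version B (the rewrite author's own statement) =====
-- stated objective: faster
-- what changed: Replaced A's recursion (which copies the whole accumulator list on every appended token and builds fresh tail strings) with a single iterative index loop over the string that appends slices to one accumulator.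
import Mathlib
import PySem

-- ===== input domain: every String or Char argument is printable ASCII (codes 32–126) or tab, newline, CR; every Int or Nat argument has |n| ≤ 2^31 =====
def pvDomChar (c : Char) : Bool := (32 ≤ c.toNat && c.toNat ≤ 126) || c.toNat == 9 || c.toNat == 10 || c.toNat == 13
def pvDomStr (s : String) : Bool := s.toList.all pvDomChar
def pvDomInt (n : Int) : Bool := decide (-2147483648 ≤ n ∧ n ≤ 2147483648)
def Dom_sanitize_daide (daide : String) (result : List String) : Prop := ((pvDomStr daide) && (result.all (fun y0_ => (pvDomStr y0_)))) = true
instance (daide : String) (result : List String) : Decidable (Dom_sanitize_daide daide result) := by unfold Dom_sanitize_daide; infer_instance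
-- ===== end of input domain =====

-- B replaces A's recursion (which copies the accumulator on every append) with an
-- iterative index loop appending slices to a single accumulator; return value only.
-- ===== PORT A =====
-- A's recursion over the string, transliterated on List Char: daide[1:], daide[:3],
-- daide[3:] are tail / take 3 / drop 3 (PySem slices are defined as clamped drop/take);
-- 'appended = result.copy(); appended.append(item)' is 'result ++ [item]'. The Nat
-- argument is pure fuel (one unit per recursive call, started at the string length,
-- which every call chain stays below); it guards termination only.
def sanitize_daide_go : Nat → List Char → List String → List String
  | 0, _, result => result
  | _ + 1, [], result => result
  | fuel + 1, first :: rest, result =>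
    if first = ' ' then sanitize_daide_go fuel rest result
    else if PySem.Chars.isalpha first && PySem.Chars.isupper first then
      sanitize_daide_go fuel ((first :: rest).drop 3)
        (result ++ [String.ofList ((first :: rest).take 3)])
    else
      sanitize_daide_go fuel rest (result ++ [String.ofList [first]])

def sanitize_daide (daide : String) (result : List String) : List String :=
  sanitize_daide_go daide.toList.length daide.toList result

-- ===== PORT B =====
-- Source B's while-loop: index i into the char list, slices daide[i:i+3] / daide[i:i+1]
-- via PySem.List.slice, one accumulator 'out' starting from a copy of result; the Nat
-- argument is the same kind of fuel guard (one unit per iteration, started at length).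
def sanitize_daide_alt_go : Nat → List Char → Nat → List String → List String
  | 0, _, _, out => out
  | fuel + 1, cs, i, out =>
    if h : i < cs.length then
      if cs[i] = ' ' then sanitize_daide_alt_go fuel cs (i + 1) out
      else if PySem.Chars.isalpha cs[i] && PySem.Chars.isupper cs[i] then
        sanitize_daide_alt_go fuel cs (i + 3)
          (out ++ [String.ofList (PySem.List.slice cs (some (i : Int)) (some ((i : Int) + 3)))])
      else
        sanitize_daide_alt_go fuel cs (i + 1)
          (out ++ [String.ofList (PySem.List.slice cs (some (i : Int)) (some ((i : Int) + 1)))])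
    else out

def sanitize_daide_alt (daide : String) (result : List String) : List String :=
  sanitize_daide_alt_go daide.toList.length daide.toList 0 result

-- ===== PRECONDITION & SPEC =====
def Spec_sanitize_daide (daide : String) (result : List String) (out : List String) : Prop := out = sanitize_daide_alt daide result
instance (daide : String) (result : List String) (out : List String) : Decidable (Spec_sanitize_daide daide result out) := by unfold Spec_sanitize_daide; infer_instance

-- ===== CLAIM (what is proved, stated in full; the proofs are below) =====
def Claim_equal_sanitize_daide : Prop := ∀ (daide : String) (result : List String), Dom_sanitize_daide daide result → Spec_sanitize_daide daide result (sanitize_daide daide result)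

-- ===== LEMMAS AND PROOFS =====

-- B's index loop at position i computes what A's recursion computes on the tail cs.drop i.
-- B's loop at index i computes, step for step with the same fuel, what A's recursion
-- computes on the tail cs.drop i.
theorem alt_go_eq_go (fuel : Nat) : ∀ (cs : List Char) (i : Nat) (out : List String),
    sanitize_daide_alt_go fuel cs i out = sanitize_daide_go fuel (cs.drop i) out := by
  induction fuel with
  | zero => intro cs i out; rfl
  | succ fuel ih =>
    intro cs i out
    by_cases h : i < cs.length
    · have hdrop : cs.drop i = cs[i] :: cs.drop (i + 1) := List.drop_eq_getElem_cons h
      rw [sanitize_daide_alt_go, dif_pos h, hdrop, sanitize_daide_go]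
      by_cases hsp : cs[i] = ' '
      · rw [if_pos hsp, if_pos hsp, ih]
      · rw [if_neg hsp, if_neg hsp]
        by_cases hal : (PySem.Chars.isalpha cs[i] && PySem.Chars.isupper cs[i]) = true
        · have h3 := PySem.List.slice_natCast_add cs i 3
          push_cast at h3
          rw [if_pos hal, if_pos hal, ih, h3, ← hdrop, List.drop_drop]
        · have h1 := PySem.List.slice_natCast_add cs i 1
          push_cast at h1
          rw [if_neg hal, if_neg hal, ih, h1, hdrop, List.take_succ_cons, List.take_zero]
    · rw [sanitize_daide_alt_go, dif_neg h, List.drop_eq_nil_of_le (by omega)]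
      cases fuel <;> rfl

-- ===== VERDICT =====
theorem sanitize_daide_spec : Claim_equal_sanitize_daide := by
  intro daide result _
  unfold Spec_sanitize_daide sanitize_daide sanitize_daide_alt
  rw [alt_go_eq_go, List.drop_zero]
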